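-- pv_equiv track=rewrite | github.com/krec-kiran/Python-code | speed_common.py | sorted_comm_by_digs
-- ===== SOURCE A (Python) =====
-- def digitroot(k):
--     k = str(k)
--     k = list(map(int, list(k)))
--     return(sum(k))
--
-- def deeperSquare(k):
--     k = str(k)
--     k = list(map(int, list(k)))
--     product = 0
--     for i in k:
--         product += i * i
--     return(product)
--
-- def sorted_comm_by_digs(arr1, arr2):
--     l = list(set(arr1) & set(arr2))
--     d = dict()
--     result = []
--     for x in l:
--         dr = digitroot(x)
--         dsaddr = deeperSquare(dr)
--         total = dr + dsaddr
--         result.append(total)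
--         if total in d.keys():
--             d[total].append(x)
--         else:
--             d[total] = [x]
--     b = []
--
-- # First sort the lists within dictionary in ascending order
--     for k in d:
--         d[k].sort()
--
-- # Second, sort the dictionary by keys which are the total deep roots -
--     s = sorted(d.keys(), reverse=True)
--
-- # Third append the original numbers / values of those keys obtained above
--     for x in s:
--         b.append(d[x])
--
-- # Fourth - append the lists within list creating one final list
--     b = [p for x in b for p in x]
--     return(b)
-- ===== SOURCE B (Python) =====
-- def digitroot(k):
--     k = str(k)
--     k = list(map(int, list(k)))
--     return(sum(k))
--
-- def deeperSquare(k):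
--     k = str(k)
--     k = list(map(int, list(k)))
--     product = 0
--     for i in k:
--         product += i * i
--     return(product)
--
-- def sorted_comm_by_digs(arr1, arr2):
--     l = list(set(arr1) & set(arr2))
--     def key(x):
--         dr = digitroot(x)
--         return (-(dr + deeperSquare(dr)), x)
--     return sorted(l, key=key)
-- ===== Notes on version B (the rewrite author's own statement) =====
-- stated objective: simpler
-- what changed: B replaces A's dict-grouping, per-bucket sort, descending key sort and flatten by a single sort of the intersection with the composite key (-(dr+deeperSquare(dr)), x), which reproduces A's order (total descending, value ascending) directly.
import Mathlib
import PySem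

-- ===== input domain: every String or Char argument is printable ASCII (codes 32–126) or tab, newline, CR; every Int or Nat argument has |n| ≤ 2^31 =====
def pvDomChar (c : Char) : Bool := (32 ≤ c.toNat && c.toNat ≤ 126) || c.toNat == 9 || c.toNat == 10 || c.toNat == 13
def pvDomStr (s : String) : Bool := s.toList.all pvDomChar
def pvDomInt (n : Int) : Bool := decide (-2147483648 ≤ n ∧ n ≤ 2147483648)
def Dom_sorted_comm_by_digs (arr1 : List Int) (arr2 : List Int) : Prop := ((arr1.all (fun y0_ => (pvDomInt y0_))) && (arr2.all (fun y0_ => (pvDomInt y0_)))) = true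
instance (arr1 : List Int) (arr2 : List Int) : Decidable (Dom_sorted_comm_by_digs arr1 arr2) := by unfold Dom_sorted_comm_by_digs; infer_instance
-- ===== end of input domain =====

-- ===== PORT A =====
-- B replaces A's dict-grouping / per-bucket sort / key sort / flatten by ONE composite-key sort (simpler).
-- digitroot(k) = sum of decimal digits of str(k); exact for 0 <= k (Pre_ keeps every grouped element nonneg,
-- so every character of str(k) is a digit and int(c) = c - '0').
def digitroot (k : Int) : Int :=
  ((PySem.Int.toChars k).map (fun c => ((c.toNat : Int) - 48))).sum

-- deeperSquare(k) = sum of squares of decimal digits of str(k); exact for 0 <= k as above.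
def deeperSquare (k : Int) : Int :=
  ((PySem.Int.toChars k).map (fun c => ((c.toNat : Int) - 48))).foldl
    (fun product i => product + i * i) 0

def sorted_comm_by_digs (arr1 : List Int) (arr2 : List Int) : List Int :=
  let l : List Int := PySem.Set.inter (PySem.Set.ofList arr1) (PySem.Set.ofList arr2)
  -- (A also builds a list 'result' of the totals; it is dead code and never returned)
  let d : PySem.Dict Int (List Int) :=
    l.foldl (fun d x =>
      let dr := digitroot x
      let dsaddr := deeperSquare dr
      let total := dr + dsaddr
      if d.contains total then PySem.Dict.modify d total [] (fun v => v ++ [x])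
      else d.insert total [x]) PySem.Dict.empty
  -- for k in d: d[k].sort()
  let d2 := (PySem.Dict.keys d).foldl
      (fun dd k => PySem.Dict.modify dd k [] (fun v => PySem.List.sorted v (fun y => y) false)) d
  let s := PySem.List.sorted (PySem.Dict.keys d2) (fun k => k) true
  let b := s.foldl (fun b x => b ++ [PySem.Dict.getD d2 x []]) []
  b.flatMap (fun x => x)

-- ===== PORT B =====
def sorted_comm_by_digs_alt (arr1 : List Int) (arr2 : List Int) : List Int :=
  let l : List Int := PySem.Set.inter (PySem.Set.ofList arr1) (PySem.Set.ofList arr2)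
  PySem.List.sorted2 l
    (fun x => let dr := digitroot x; -(dr + deeperSquare dr))
    (fun x => x) false

-- ===== PRECONDITION & SPEC =====
-- Pre_ excludes inputs whose intersection contains a negative element: there str(x) starts with '-'
-- and both A and B raise ValueError in int('-').
def Pre_sorted_comm_by_digs (arr1 : List Int) (arr2 : List Int) : Prop :=
  ∀ x ∈ arr1, x ∈ arr2 → 0 ≤ x
instance (arr1 : List Int) (arr2 : List Int) : Decidable (Pre_sorted_comm_by_digs arr1 arr2) := by
  unfold Pre_sorted_comm_by_digs; infer_instance

def pvWitness_sorted_comm_by_digs : List Int × List Int := ([12, 5, 7, 21], [5, 101, 12, 21])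

def Spec_sorted_comm_by_digs (arr1 : List Int) (arr2 : List Int) (out : List Int) : Prop := out = sorted_comm_by_digs_alt arr1 arr2
instance (arr1 : List Int) (arr2 : List Int) (out : List Int) : Decidable (Spec_sorted_comm_by_digs arr1 arr2 out) := by unfold Spec_sorted_comm_by_digs; infer_instance

-- ===== CLAIM (what is proved, stated in full; the proofs are below) =====
def Claim_equal_sorted_comm_by_digs : Prop := ∀ (arr1 : List Int) (arr2 : List Int), Dom_sorted_comm_by_digs arr1 arr2 → Pre_sorted_comm_by_digs arr1 arr2 → Spec_sorted_comm_by_digs arr1 arr2 (sorted_comm_by_digs arr1 arr2)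

-- ===== LEMMAS AND PROOFS =====

-- the composite metric: total = digitroot x + deeperSquare (digitroot x)
def pvK (x : Int) : Int := digitroot x + deeperSquare (digitroot x)
def pvLt (a b : Int) : Prop := pvK b < pvK a ∨ (pvK a = pvK b ∧ a < b)

lemma before_eq_pvLt (a b : Int) :
    (decide ((fun x => let dr := digitroot x; -(dr + deeperSquare dr)) a < (fun x => let dr := digitroot x; -(dr + deeperSquare dr)) b) ||
      (!decide ((fun x => let dr := digitroot x; -(dr + deeperSquare dr)) b < (fun x => let dr := digitroot x; -(dr + deeperSquare dr)) a) &&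
        decide ((fun x : Int => x) a < (fun x : Int => x) b))) = true ↔ pvLt a b := by
  simp [pvLt, pvK]; omega

lemma insertBy_cons (bef : Int → Int → Bool) (x y : Int) (ys : List Int) :
    PySem.List.insertBy bef x (y :: ys) = if bef x y then x :: y :: ys else y :: PySem.List.insertBy bef x ys := rfl

lemma pvLt_trans {a b c : Int} (h1 : pvLt a b) (h2 : pvLt b c) : pvLt a c := by
  unfold pvLt at *; omega

lemma insertBy_pairwise (bef : Int → Int → Bool) (hbef : ∀ a b, bef a b = true ↔ pvLt a b)
    (x : Int) (acc : List Int) (h : acc.Pairwise (fun a b => ¬ pvLt b a)) :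
    (PySem.List.insertBy bef x acc).Pairwise (fun a b => ¬ pvLt b a) := by
  induction acc with
  | nil => simp [PySem.List.insertBy]
  | cons y ys ih =>
    rw [insertBy_cons]
    rcases List.pairwise_cons.mp h with ⟨hy, hys⟩
    by_cases hxy : bef x y = true
    · rw [if_pos hxy]
      have hlt : pvLt x y := (hbef x y).mp hxy
      refine List.pairwise_cons.mpr ⟨?_, h⟩
      intro z hz
      rcases List.mem_cons.mp hz with rfl | hz
      · intro hc; exact absurd hc (by have := hlt; unfold pvLt at *; omega)
      · intro hc; exact hy z hz (pvLt_trans hc hlt)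
    · rw [if_neg hxy]
      refine List.pairwise_cons.mpr ⟨?_, ih hys⟩
      intro z hz
      rcases (PySem.List.mem_insertBy bef x z ys).mp hz with rfl | hz
      · intro hc; exact hxy ((hbef z y).mpr hc)
      · exact hy z hz

lemma pvLt_asymm {a b : Int} (h : pvLt a b) : ¬ pvLt b a := by
  unfold pvLt at *; omega

lemma pvLt_total {a b : Int} (h1 : ¬ pvLt a b) (h2 : ¬ pvLt b a) : a = b := by
  unfold pvLt at *; omega

lemma foldl_insertBy_pairwise (bef : Int → Int → Bool) (hbef : ∀ a b, bef a b = true ↔ pvLt a b)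
    (xs acc : List Int) (h : acc.Pairwise (fun a b => ¬ pvLt b a)) :
    (xs.foldl (fun acc x => PySem.List.insertBy bef x acc) acc).Pairwise (fun a b => ¬ pvLt b a) := by
  induction xs generalizing acc with
  | nil => exact h
  | cons y ys ih => exact ih _ (insertBy_pairwise bef hbef y acc h)

lemma dedup_append_singleton (m : List Int) (t : Int) :
    PySem.List.dedup (m ++ [t]) = if t ∈ m then PySem.List.dedup m else PySem.List.dedup m ++ [t] := by
  have h1 : PySem.List.dedup (m ++ [t]) = PySem.Set.add (PySem.List.dedup m) t := by
    simp [PySem.List.dedup_eq_ofList, PySem.Set.ofList, List.foldl_append]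
  rw [h1, PySem.Set.add]
  by_cases hm : t ∈ m
  · rw [if_pos ?_, if_pos hm]
    simpa [PySem.Set.contains] using (PySem.List.mem_dedup m t).mpr hm
  · rw [if_neg ?_, if_neg hm]
    simp [PySem.Set.contains, hm]

lemma getD_of_items_map (M : List Int) (g : Int → List Int) (t : Int) (ht : t ∈ M) :
    PySem.Dict.getD (PySem.Dict.mk (M.map (fun t => (t, g t)))) t [] = g t := by
  induction M with
  | nil => simp at ht
  | cons m M ih =>
    by_cases hmt : m = t
    · subst hmt; simp [PySem.Dict.getD, PySem.Dict.get?]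
    · rcases List.mem_cons.mp ht with rfl | ht'
      · exact absurd rfl hmt
      · have := ih ht'
        simpa [PySem.Dict.getD, PySem.Dict.get?, List.find?, hmt] using this

lemma contains_of_items_map (M : List Int) (g : Int → List Int) (t : Int) :
    PySem.Dict.contains (PySem.Dict.mk (M.map (fun t => (t, g t)))) t = true ↔ t ∈ M := by
  simp [PySem.Dict.contains, List.any_map, Function.comp]

lemma group_items (l : List Int) :
    (l.foldl (fun d x =>
      let dr := digitroot x
      let dsaddr := deeperSquare dr
      let total := dr + dsaddr
      if d.contains total then PySem.Dict.modify d total [] (fun v => v ++ [x])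
      else d.insert total [x]) (PySem.Dict.empty : PySem.Dict Int (List Int)))
    = PySem.Dict.mk ((PySem.List.dedup (l.map pvK)).map (fun t => (t, l.filter (fun x => pvK x == t)))) := by
  induction l using List.reverseRecOn with
  | nil => rfl
  | append_singleton l x ih =>
    rw [List.foldl_append, List.foldl_cons, List.foldl_nil, ih]
    show (if (PySem.Dict.mk ((PySem.List.dedup (l.map pvK)).map (fun t => (t, l.filter (fun x => pvK x == t))))).contains (pvK x)
        then PySem.Dict.modify _ (pvK x) [] (fun v => v ++ [x])
        else PySem.Dict.insert _ (pvK x) [x]) = _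
    have hmapx : (l ++ [x]).map pvK = l.map pvK ++ [pvK x] := by simp
    by_cases hmem : pvK x ∈ l.map pvK
    · rw [if_pos ((contains_of_items_map _ _ _).mpr (by simpa using hmem))]
      rw [PySem.Dict.modify, getD_of_items_map _ _ _ (by simpa using hmem)]
      rw [PySem.Dict.insert, if_pos ((contains_of_items_map _ _ _).mpr (by simpa using hmem))]
      congr 1
      rw [List.map_map, hmapx, dedup_append_singleton, if_pos hmem]
      refine List.map_congr_left ?_
      intro t ht
      simp only [Function.comp]
      by_cases hteq : t = pvK x
      · subst hteq; simp [List.filter_append]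
      · have h1 : (t == pvK x) = false := by simpa using hteq
        have h2 : (pvK x == t) = false := by simpa using fun h : pvK x = t => hteq h.symm
        simp [h1, h2, List.filter_append]
    · have hcont : ¬ ((PySem.Dict.mk ((PySem.List.dedup (l.map pvK)).map (fun t => (t, l.filter (fun x => pvK x == t))))).contains (pvK x) = true) :=
        fun hc => hmem (by simpa using (contains_of_items_map _ _ _).mp hc)
      rw [if_neg hcont, PySem.Dict.insert, if_neg hcont]
      congr 1
      rw [hmapx, dedup_append_singleton, if_neg hmem, List.map_append]
      have hnil : l.filter (fun y => pvK y == pvK x) = [] := by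
        rw [List.filter_eq_nil_iff]
        intro a ha hc
        exact hmem (List.mem_map.mpr ⟨a, ha, by simpa using hc⟩)
      congr 1
      · refine List.map_congr_left ?_
        intro t ht
        have htmem : t ∈ l.map pvK := by simpa using ht
        have htne : (pvK x == t) = false := by
          simpa using fun h : pvK x = t => hmem (h ▸ htmem)
        simp [List.filter_append, htne]
      · simp [List.filter_append, hnil]

lemma fold_modify_shape (ks : List Int) : ∀ (M : List Int) (g : Int → List Int), ks.Nodup → (∀ k ∈ ks, k ∈ M) →
    (ks.foldl (fun dd k => PySem.Dict.modify dd k [] (fun v => PySem.List.sorted v (fun y => y) false))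
      (PySem.Dict.mk (M.map (fun t => (t, g t)))))
    = PySem.Dict.mk (M.map (fun t => (t, if t ∈ ks then PySem.List.sorted (g t) (fun y => y) false else g t))) := by
  induction ks with
  | nil => intro M g _ _; simp
  | cons k ks ih =>
    intro M g hnd hcov
    have hkM : k ∈ M := hcov k (by simp)
    rw [List.foldl_cons, PySem.Dict.modify, getD_of_items_map _ _ _ hkM,
      PySem.Dict.insert, if_pos ((contains_of_items_map _ _ _).mpr hkM)]
    have hshape : (List.map (fun t => (t, g t)) M).map
        (fun p => if p.1 == k then (k, PySem.List.sorted (g k) (fun y => y) false) else p)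
        = M.map (fun t => (t, if t = k then PySem.List.sorted (g t) (fun y => y) false else g t)) := by
      rw [List.map_map]
      refine List.map_congr_left ?_
      intro t _
      by_cases hteq : t = k
      · subst hteq; simp
      · simp [Function.comp, hteq]
    rw [hshape, ih M _ (List.nodup_cons.mp hnd).2 (fun j hj => hcov j (by simp [hj]))]
    congr 1
    refine List.map_congr_left ?_
    intro t _
    by_cases hteq : t = k
    · subst hteq
      have hns : t ∉ ks := (List.nodup_cons.mp hnd).1
      simp [hns]
    · simp [hteq]

lemma flatMap_perm_pointwise (s : List Int) (F G : Int → List Int) (h : ∀ t, (F t).Perm (G t)) :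
    (s.flatMap F).Perm (s.flatMap G) := by
  induction s with
  | nil => simp
  | cons a s ih => simpa using (h a).append ih

lemma partition_perm (ks : List Int) : ∀ (l : List Int), ks.Nodup → (∀ x ∈ l, pvK x ∈ ks) →
    (ks.flatMap (fun t => l.filter (fun x => pvK x == t))).Perm l := by
  induction ks with
  | nil =>
    intro l _ hcov
    have : l = [] := List.eq_nil_iff_forall_not_mem.mpr (fun x hx => by simpa using hcov x hx)
    simp [this]
  | cons k ks ih =>
    intro l hnd hcov
    rw [List.flatMap_cons]
    have hrest : ks.flatMap (fun t => l.filter (fun x => pvK x == t))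
        = ks.flatMap (fun t => (l.filter (fun x => !(pvK x == k))).filter (fun x => pvK x == t)) := by
      refine List.flatMap_congr ?_
      intro t ht
      have htk : t ≠ k := fun h => (List.nodup_cons.mp hnd).1 (h ▸ ht)
      rw [List.filter_filter]
      refine (List.filter_congr ?_).symm
      intro x _
      by_cases hx : pvK x = t
      · simp [hx, fun h : t = k => htk h]
      · simp [hx]
    rw [hrest]
    have hcov' : ∀ x ∈ l.filter (fun x => !(pvK x == k)), pvK x ∈ ks := by
      intro x hx
      rcases List.mem_filter.mp hx with ⟨hxl, hxk⟩
      have := hcov x hxl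
      simp at hxk
      simpa [hxk] using this
    exact ((List.Perm.append_left _ (ih _ (List.nodup_cons.mp hnd).2 hcov')).trans
      (List.filter_append_perm _ l))

lemma keys_of_items_map (M : List Int) (g : Int → List Int) :
    PySem.Dict.keys (PySem.Dict.mk (M.map (fun t => (t, g t)))) = M := by
  simp [PySem.Dict.keys, List.map_map, Function.comp_def]

lemma core (l : List Int) (hnd : l.Nodup) :
    (let d : PySem.Dict Int (List Int) :=
      l.foldl (fun d x =>
        let dr := digitroot x
        let dsaddr := deeperSquare dr
        let total := dr + dsaddr
        if d.contains total then PySem.Dict.modify d total [] (fun v => v ++ [x])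
        else d.insert total [x]) PySem.Dict.empty
    let d2 := (PySem.Dict.keys d).foldl
        (fun dd k => PySem.Dict.modify dd k [] (fun v => PySem.List.sorted v (fun y => y) false)) d
    let s := PySem.List.sorted (PySem.Dict.keys d2) (fun k => k) true
    let b := s.foldl (fun b x => b ++ [PySem.Dict.getD d2 x []]) []
    b.flatMap (fun x => x))
    = PySem.List.sorted2 l
        (fun x => let dr := digitroot x; -(dr + deeperSquare dr))
        (fun x => x) false := by
  dsimp only []
  rw [group_items, keys_of_items_map,
    fold_modify_shape _ _ _ (PySem.List.nodup_dedup _) (fun k hk => hk)]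
  set M := PySem.List.dedup (l.map pvK) with hMdef
  have hMnd : M.Nodup := PySem.List.nodup_dedup _
  set g : Int → List Int := fun t => l.filter (fun x => pvK x == t) with hgdef
  have hd2 : M.map (fun t => (t, if t ∈ M then PySem.List.sorted (g t) (fun y => y) false else g t))
      = M.map (fun t => (t, PySem.List.sorted (g t) (fun y => y) false)) :=
    List.map_congr_left (fun t ht => by simp [ht])
  rw [hd2, keys_of_items_map, PySem.List.foldl_append_singleton_eq_map]
  set F : Int → List Int := fun t => PySem.List.sorted (g t) (fun y => y) false with hFdef
  set s := PySem.List.sorted M (fun k => k) true with hsdef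
  have hmemsM : ∀ {t : Int}, t ∈ s → t ∈ M := fun ht => (PySem.List.mem_sorted _ _ _ _).mp ht
  have hget : s.map (fun t => PySem.Dict.getD (PySem.Dict.mk (M.map (fun t => (t, F t)))) t []) = s.map F :=
    List.map_congr_left (fun t ht => getD_of_items_map M F t (hmemsM ht))
  rw [List.nil_append, hget]
  have hflat : (s.map F).flatMap (fun x => x) = s.flatMap F := by
    simp [List.flatMap_def, List.map_map, Function.comp_def]
  rw [hflat]
  -- membership facts
  have hcov : ∀ x ∈ l, pvK x ∈ M := fun x hx =>
    (PySem.List.mem_dedup _ _).mpr (List.mem_map.mpr ⟨x, hx, rfl⟩)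
  have hmemF : ∀ {t x : Int}, x ∈ F t → x ∈ l ∧ pvK x = t := by
    intro t x hx
    have hx' : x ∈ g t := (PySem.List.mem_sorted _ _ _ _).mp hx
    exact ⟨List.mem_filter.mp hx' |>.1, by simpa using List.mem_filter.mp hx' |>.2⟩
  -- permutations
  have hs : s.Perm M := PySem.List.sorted_perm M _ true
  have hpermA : (s.flatMap F).Perm l :=
    ((flatMap_perm_pointwise s F g (fun t => PySem.List.sorted_perm _ _ _)).trans
      (List.Perm.flatMap_right g hs)).trans (partition_perm M l hMnd hcov)
  have hpermB : (PySem.List.sorted2 l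
      (fun x => let dr := digitroot x; -(dr + deeperSquare dr)) (fun x : Int => x) false).Perm l :=
    PySem.List.sorted2_perm l _ _ false
  -- pairwise on the A side
  have hsnd : s.Nodup := hs.symm.nodup hMnd
  have hsrev : s.Pairwise (fun a b : Int => b < a) :=
    ((PySem.List.sorted_pairwise_rev M (fun k => k)).and hsnd).imp_of_mem
      (fun _ _ h => lt_of_le_of_ne h.1 (Ne.symm h.2))
  have hpairA : (s.flatMap F).Pairwise pvLt := by
    refine List.pairwise_flatMap.mpr ⟨?_, ?_⟩
    · intro t _
      have h1 : (F t).Pairwise (fun a b : Int => a ≤ b) := PySem.List.sorted_pairwise (g t) (fun y => y)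
      have h2 : (F t).Nodup := (PySem.List.sorted_perm (g t) _ false).symm.nodup (hnd.filter _)
      exact (h1.and h2).imp_of_mem (fun ha hb h =>
        Or.inr ⟨by rw [(hmemF ha).2, (hmemF hb).2], lt_of_le_of_ne h.1 h.2⟩)
    · refine hsrev.imp_of_mem ?_
      intro t1 t2 h1 h2 hlt x hx y hy
      exact Or.inl (by rw [(hmemF hx).2, (hmemF hy).2]; exact hlt)
  -- pairwise on the B side
  have hB : PySem.List.sorted2 l
      (fun x => let dr := digitroot x; -(dr + deeperSquare dr)) (fun x : Int => x) false
      = l.foldl (fun acc x => PySem.List.insertBy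
          (fun a b => decide ((fun x => let dr := digitroot x; -(dr + deeperSquare dr)) a < (fun x => let dr := digitroot x; -(dr + deeperSquare dr)) b) ||
            (!decide ((fun x => let dr := digitroot x; -(dr + deeperSquare dr)) b < (fun x => let dr := digitroot x; -(dr + deeperSquare dr)) a) &&
              decide ((fun x : Int => x) a < (fun x : Int => x) b))) x acc) [] := rfl
  have hpairB : (PySem.List.sorted2 l
      (fun x => let dr := digitroot x; -(dr + deeperSquare dr)) (fun x : Int => x) false).Pairwise
      (fun a b => ¬ pvLt b a) := by
    rw [hB]
    exact foldl_insertBy_pairwise _ before_eq_pvLt l [] (by simp)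
  exact List.Perm.eq_of_pairwise
    (fun a b _ _ h1 h2 => pvLt_total h2 h1)
    (hpairA.imp (fun h => pvLt_asymm h)) hpairB (hpermA.trans hpermB.symm)

-- ===== VERDICT (by name: the statement is the Claim_ definition above) =====
theorem sorted_comm_by_digs_spec : Claim_equal_sorted_comm_by_digs := by
  intro arr1 arr2 _ _
  unfold Spec_sorted_comm_by_digs sorted_comm_by_digs sorted_comm_by_digs_alt
  exact core _ (List.Nodup.filter _ (PySem.Set.nodup_ofList arr1))
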